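-- pv_equiv track=rewrite | github.com/mohilkhare1708/Competitive-Programming | Misc/Coding/googleFoobar/gfc1.py | solution
-- ===== SOURCE A (Python) =====
-- def solution(x, y):
--     oneLess = []
--     main = []
--     if len(x) > len(y):
--         oneLess = y
--         main = x
--     else:
--         oneLess = x
--         main = y
--     oneLess.sort()
--     main.sort()
--     for i in range(len(oneLess)):
--         if main[i] != oneLess[i]:
--             return main[i]
--     return main[len(main)-1]
-- ===== SOURCE B (Python) =====
-- def solution(x, y):
--     short, main = (y, x) if len(x) > len(y) else (x, y)
--     a = sorted(short)
--     b = sorted(main)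
--     # The extra element sits where the two sorted lists first diverge (or at the
--     # very end of b).  Prefix equality is monotone, so locate the divergence
--     # point by bisection: lo ends as the length of the longest common prefix.
--     lo, hi = 0, len(a)
--     while lo < hi:
--         mid = (lo + hi) // 2
--         if a[:mid + 1] == b[:mid + 1]:
--             lo = mid + 1
--         else:
--             hi = mid
--     return b[lo] if lo < len(a) else b[-1]
-- ===== Notes on version B (the rewrite author's own statement) =====
-- stated objective: alternative
-- what changed: Keeps the sort but replaces A's linear index scan with a binary search: prefix equality of the two sorted lists is monotone, so the divergence point (the extra element's position) is located by bisection on prefix equality; B also returns a fresh result without mutating its arguments, where A sorts them in place. Pre_ excludes only the both-empty input, on which A raises IndexError (and B raises too).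
import Mathlib
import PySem

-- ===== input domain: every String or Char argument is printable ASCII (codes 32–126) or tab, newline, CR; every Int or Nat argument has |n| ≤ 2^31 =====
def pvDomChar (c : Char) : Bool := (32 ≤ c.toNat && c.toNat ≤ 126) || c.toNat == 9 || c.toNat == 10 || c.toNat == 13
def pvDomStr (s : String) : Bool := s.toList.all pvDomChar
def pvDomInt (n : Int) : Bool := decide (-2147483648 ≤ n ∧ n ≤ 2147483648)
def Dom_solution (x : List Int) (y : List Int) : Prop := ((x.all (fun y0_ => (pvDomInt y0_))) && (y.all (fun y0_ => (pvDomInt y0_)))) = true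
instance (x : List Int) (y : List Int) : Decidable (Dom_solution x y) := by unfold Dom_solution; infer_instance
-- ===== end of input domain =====

-- B locates the divergence point of the two sorted lists by bisection on prefix equality instead of
-- A's linear index scan; equivalence is about the RETURN value only: Python A sorts its arguments in
-- place, B does not mutate them.

-- ===== PORT A =====
-- the 'for i in range(len(oneLess))' loop of A
def solutionGo (main oneLess : List Int) (i : Nat) : Int :=
  if _h : i < oneLess.length then
    if PySem.List.pyGetD main (i : Int) 0 ≠ PySem.List.pyGetD oneLess (i : Int) 0 then
      PySem.List.pyGetD main (i : Int) 0
    else solutionGo main oneLess (i + 1)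
  else
    -- main[len(main)-1]; on empty main Python raises IndexError (outside Pre_)
    PySem.List.pyGetD main ((main.length : Int) - 1) 0
termination_by oneLess.length - i

-- the code of A after the oneLess/main assignment: sort both, then scan
def solutionRest (oneLess main : List Int) : Int :=
  solutionGo (PySem.List.sorted main (fun v => v) false)
    (PySem.List.sorted oneLess (fun v => v) false) 0

def solution (x : List Int) (y : List Int) : Int :=
  if x.length > y.length then solutionRest y x else solutionRest x y

-- ===== PORT B =====
-- B's 'while lo < hi' bisection on prefix equality (a[:mid+1] == b[:mid+1])
def bisectGo (a b : List Int) (lo hi : Nat) : Nat :=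
  if lo < hi then
    let mid := (lo + hi) / 2
    if PySem.List.slice a none (some ((mid : Int) + 1)) =
        PySem.List.slice b none (some ((mid : Int) + 1)) then
      bisectGo a b (mid + 1) hi
    else bisectGo a b lo mid
  else lo
termination_by hi - lo
decreasing_by all_goals omega

-- the code of B after the short/main assignment: sort copies, bisect, index
-- (b[lo] and b[-1]; on the both-empty input Python raises IndexError, outside Pre_)
def solutionAltRest (short main : List Int) : Int :=
  let a := PySem.List.sorted short (fun v => v) false
  let b := PySem.List.sorted main (fun v => v) false
  let lo := bisectGo a b 0 a.length
  if lo < a.length then PySem.List.pyGetD b (lo : Int) 0 else PySem.List.pyGetD b (-1) 0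

def solution_alt (x : List Int) (y : List Int) : Int :=
  if x.length > y.length then solutionAltRest y x else solutionAltRest x y

-- ===== PRECONDITION & SPEC =====
-- Pre_ excludes only the input where both lists are empty: there Python A raises IndexError
-- on main[len(main)-1] (and B's b[-1] raises IndexError too).
def Pre_solution (x : List Int) (y : List Int) : Prop := ¬(x = [] ∧ y = [])
instance (x : List Int) (y : List Int) : Decidable (Pre_solution x y) := by unfold Pre_solution; infer_instance
def pvWitness_solution : List Int × List Int := ([1], [2, 1])

def Spec_solution (x : List Int) (y : List Int) (out : Int) : Prop := out = solution_alt x y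
instance (x : List Int) (y : List Int) (out : Int) : Decidable (Spec_solution x y out) := by unfold Spec_solution; infer_instance

-- ===== CLAIM (what is proved, stated in full; the proofs are below) =====
def Claim_equal_solution : Prop := ∀ (x : List Int) (y : List Int), Dom_solution x y → Pre_solution x y → Spec_solution x y (solution x y)

-- ===== LEMMAS AND PROOFS =====

-- first mismatch of A's scan on the two sorted lists
def pvFM : List Int → List Int → Option Int
  | u :: us, v :: vs => if v ≠ u then some v else pvFM us vs
  | _, _ => none

-- length of the common prefix of two lists
def pvCP : List Int → List Int → Nat
  | u :: us, v :: vs => if v = u then pvCP us vs + 1 else 0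
  | _, _ => 0

-- A's index loop is pvFM on the suffixes, with main[len-1] as the fall-through value
lemma solutionGo_eq (b a : List Int) (h : a.length ≤ b.length) (i : Nat) :
    solutionGo b a i =
      (pvFM (a.drop i) (b.drop i)).getD (PySem.List.pyGetD b ((b.length : Int) - 1) 0) := by
  have key : ∀ (n i : Nat), a.length - i ≤ n →
      solutionGo b a i =
        (pvFM (a.drop i) (b.drop i)).getD (PySem.List.pyGetD b ((b.length : Int) - 1) 0) := by
    intro n
    induction n with
    | zero =>
        intro i hi
        rw [solutionGo]
        rw [dif_neg (by omega)]
        have hd : a.drop i = [] := List.drop_eq_nil_of_le (by omega)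
        simp [hd, pvFM]
    | succ n ihn =>
        intro i hi
        rw [solutionGo]
        by_cases hia : i < a.length
        · have hib : i < b.length := lt_of_lt_of_le hia h
          rw [dif_pos hia]
          rw [List.drop_eq_getElem_cons hia, List.drop_eq_getElem_cons hib]
          have ha : PySem.List.pyGetD a (i : Int) 0 = a[i] := by
            simp [PySem.List.pyGetD_natCast, List.getD_eq_getElem?_getD, hia]
          have hb : PySem.List.pyGetD b (i : Int) 0 = b[i] := by
            simp [PySem.List.pyGetD_natCast, List.getD_eq_getElem?_getD, hib]
          by_cases hne : b[i] ≠ a[i]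
          · rw [if_pos (by rw [ha, hb]; exact hne)]
            simp [pvFM, hne, hb]
          · rw [if_neg (by rw [ha, hb]; exact hne)]
            have hne' : b[i] = a[i] := by
              by_contra hc
              exact hne hc
            have := ihn (i + 1) (by omega)
            simp only [pvFM, hne', ne_eq, not_true_eq_false, ite_false]
            simpa using this
        · rw [dif_neg hia]
          have hd : a.drop i = [] := List.drop_eq_nil_of_le (by omega)
          simp [hd, pvFM]
  exact key a.length i (by omega)

-- the common prefix is no longer than either list
lemma pvCP_le (a : List Int) : ∀ b : List Int, pvCP a b ≤ a.length := by
  induction a with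
  | nil => intro b; cases b <;> simp [pvCP]
  | cons u us ih =>
    intro b
    cases b with
    | nil => simp [pvCP]
    | cons v vs =>
      rw [pvCP]
      split_ifs
      · have := ih vs; simp; omega
      · simp

-- prefix equality is exactly 'below the common prefix length'
lemma pvTakeIff (a : List Int) : ∀ (b : List Int) (i : Nat), i ≤ a.length → a.length ≤ b.length →
    (a.take i = b.take i ↔ i ≤ pvCP a b) := by
  induction a with
  | nil =>
    intro b i hi _
    simp only [List.length_nil, Nat.le_zero] at hi
    subst hi
    simp [pvCP]
  | cons u us ih =>
    intro b i hi hlen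
    cases b with
    | nil => simp at hlen
    | cons v vs =>
      cases i with
      | zero => simp
      | succ j =>
        rw [List.take_succ_cons, List.take_succ_cons, pvCP]
        by_cases hvu : v = u
        · rw [if_pos hvu]
          subst hvu
          have hiff := ih vs j (by simpa using hi) (by simpa using hlen)
          constructor
          · intro hq
            injection hq with _ h2
            have := hiff.1 h2
            omega
          · intro hq
            have h2 : us.take j = vs.take j := hiff.2 (by omega)
            rw [h2]
        · rw [if_neg hvu]
          constructor
          · intro hq
            injection hq with h1 _
            exact absurd h1.symm hvu
          · intro hq
            omega
  
-- B's bisection returns the common prefix length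
lemma bisectGo_eq (a b : List Int) (hab : a.length ≤ b.length) :
    ∀ (n lo hi : Nat), hi - lo ≤ n → lo ≤ pvCP a b → pvCP a b ≤ hi → hi ≤ a.length →
      bisectGo a b lo hi = pvCP a b := by
  intro n
  induction n with
  | zero =>
    intro lo hi hn h1 h2 _
    rw [bisectGo, if_neg (by omega)]
    omega
  | succ n ihn =>
    intro lo hi hn h1 h2 h3
    by_cases hlh : lo < hi
    · rw [bisectGo, if_pos hlh]
      have hmid1 : lo ≤ (lo + hi) / 2 := by omega
      have hmid2 : (lo + hi) / 2 < hi := by omega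
      show (if PySem.List.slice a none (some ((((lo + hi) / 2 : Nat) : Int) + 1)) =
              PySem.List.slice b none (some ((((lo + hi) / 2 : Nat) : Int) + 1)) then
            bisectGo a b ((lo + hi) / 2 + 1) hi
          else bisectGo a b lo ((lo + hi) / 2)) = pvCP a b
      have hslice : ∀ (l : List Int) (m : Nat),
          PySem.List.slice l none (some ((m : Int) + 1)) = l.take (m + 1) := by
        intro l m
        have : ((m : Int) + 1) = (((m + 1 : Nat)) : Int) := by push_cast; ring
        rw [this, PySem.List.slice_to_natCast]
      rw [hslice, hslice]
      by_cases heq : a.take ((lo + hi) / 2 + 1) = b.take ((lo + hi) / 2 + 1)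
      · rw [if_pos heq]
        have hle : (lo + hi) / 2 + 1 ≤ pvCP a b :=
          (pvTakeIff a b ((lo + hi) / 2 + 1) (by omega) hab).1 heq
        exact ihn ((lo + hi) / 2 + 1) hi (by omega) hle h2 h3
      · rw [if_neg heq]
        have hgt : ¬((lo + hi) / 2 + 1 ≤ pvCP a b) := by
          intro hc
          exact heq ((pvTakeIff a b ((lo + hi) / 2 + 1) (by omega) hab).2 hc)
        exact ihn lo ((lo + hi) / 2) (by omega) h1 (by omega) (by omega)
    · rw [bisectGo, if_neg hlh]
      omega

-- A's scan result expressed through the common prefix length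
lemma pvFM_cp (a : List Int) : ∀ b : List Int, a.length ≤ b.length →
    pvFM a b = if pvCP a b < a.length then some (b.getD (pvCP a b) 0) else none := by
  induction a with
  | nil => intro b _; cases b <;> simp [pvFM, pvCP]
  | cons u us ih =>
    intro b hlen
    cases b with
    | nil => simp at hlen
    | cons v vs =>
      rw [pvFM, pvCP]
      by_cases hvu : v = u
      · rw [if_neg (by simpa using hvu), if_pos hvu]
        rw [ih vs (by simpa using hlen)]
        by_cases hlt : pvCP us vs < us.length
        · rw [if_pos hlt, if_pos (by simpa using hlt)]
          simp
        · rw [if_neg hlt, if_neg (by simpa using hlt)]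
      · rw [if_pos (by simpa using hvu), if_neg hvu, if_pos (by simp)]
        simp

-- b[-1] is b[len(b)-1] for nonempty b
lemma pvNegOne (l : List Int) (h : l ≠ []) :
    PySem.List.pyGetD l (-1) 0 = PySem.List.pyGetD l ((l.length : Int) - 1) 0 := by
  have hl : 0 < l.length := List.length_pos_of_ne_nil h
  have hcast : ((l.length : Int) - 1) = (((l.length - 1 : Nat)) : Int) := by omega
  rw [hcast, PySem.List.pyGetD_natCast]
  simp [PySem.List.pyGetD, PySem.List.pyGet?, PySem.List.pyIdx?, hl,
    List.getD_eq_getElem?_getD]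
  rw [if_pos (by omega : 1 ≤ l.length)]
  simp [List.getElem?_eq_getElem (by omega : l.length - 1 < l.length)]

-- the shared tails agree whenever the first list is at most as long as the (nonempty) second
lemma pvCore (s b : List Int) (h : s.length ≤ b.length) (hb : b ≠ []) :
    solutionRest s b = solutionAltRest s b := by
  set A := PySem.List.sorted s (fun v => v) false with hAdef
  set B := PySem.List.sorted b (fun v => v) false with hBdef
  have hlen : A.length ≤ B.length := by
    rw [hAdef, hBdef, PySem.List.length_sorted, PySem.List.length_sorted]; exact h
  have hBne : B ≠ [] := by
    rw [hBdef, ne_eq, PySem.List.sorted_eq_nil_iff]; exact hb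
  have hA : solutionRest s b =
      (pvFM A B).getD (PySem.List.pyGetD B ((B.length : Int) - 1) 0) := by
    show solutionGo B A 0 = _
    rw [solutionGo_eq B A hlen 0]
    simp
  have hBis : bisectGo A B 0 A.length = pvCP A B :=
    bisectGo_eq A B hlen A.length 0 A.length (by omega) (by omega) (pvCP_le A B) (by omega)
  have hAlt : solutionAltRest s b =
      (if pvCP A B < A.length then PySem.List.pyGetD B ((pvCP A B : Int)) 0
       else PySem.List.pyGetD B (-1) 0) := by
    show (if bisectGo A B 0 A.length < A.length
          then PySem.List.pyGetD B ((bisectGo A B 0 A.length : Int)) 0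
          else PySem.List.pyGetD B (-1) 0) = _
    rw [hBis]
  rw [hA, hAlt, pvFM_cp A B hlen]
  by_cases hlt : pvCP A B < A.length
  · rw [if_pos hlt, if_pos hlt]
    rw [PySem.List.pyGetD_natCast]
    simp
  · rw [if_neg hlt, if_neg hlt, Option.getD_none]
    rw [pvNegOne B hBne]

-- ===== VERDICT (by name: the statement is the Claim_ definition above) =====
theorem solution_spec : Claim_equal_solution := by
  intro x y _ hpre
  unfold Spec_solution solution solution_alt
  by_cases hgt : x.length > y.length
  · rw [if_pos hgt, if_pos hgt]
    exact pvCore y x (by omega) (by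
      intro hc
      rw [hc] at hgt
      simp at hgt)
  · rw [if_neg hgt, if_neg hgt]
    refine pvCore x y (by omega) ?_
    intro hc
    apply hpre
    subst hc
    have hx : x = [] := by
      cases x with
      | nil => rfl
      | cons a t => exact absurd (by simp) hgt
    exact ⟨hx, rfl⟩
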